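-- pv_equiv track=rewrite | github.com/DavidContrerasICAI/programacion-imat | practicas/12.python_avanzado_ordenadores/funciones.py | normalizar_marcas
-- ===== SOURCE A (Python) =====
-- def normalizar_marcas(marca_entrada:str) -> str:
--     """
--     Normaliza la marca recibida a una de las predefinidas.
--     Si no encuentra ningún matching, se asignará a la primera: DELL.
--
--     Returns:
--         marca_normalizada (str): "DELL", "HP", "Lenovo"
--     Examples:
--         "DLL" --> "DELL"
--     Raises:
--         Ninguna exception
--     """
--     marcas_estandarizadas = ["DELL", "HP", "Lenovo"]
--     marca_normalizada = ""
--
--     if marca_entrada not in marcas_estandarizadas: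
--         coincidencias_lista = []
--         for marca_estandarizada in marcas_estandarizadas:
--             coincidencias = 0
--             for letra in marca_entrada:
--                 coincidencias += marca_estandarizada.count(letra)
--             coincidencias_lista.append(coincidencias)
--
--         posicion = coincidencias_lista.index(max(coincidencias_lista))
--
--         marca_normalizada = marcas_estandarizadas[posicion]
--     else:
--         marca_normalizada = marca_entrada
--
--     return marca_normalizada
-- ===== SOURCE B (Python) =====
-- def normalizar_marcas(marca_entrada: str) -> str:
--     marcas_estandarizadas = ["DELL", "HP", "Lenovo"]
--     if marca_entrada in marcas_estandarizadas:
--         return marca_entrada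
--     # one pass over the input to build a letter-frequency table,
--     # then score each brand by walking its own (few) letters
--     freq = {}
--     for c in marca_entrada:
--         freq[c] = freq.get(c, 0) + 1
--     mejor = None
--     mejor_puntos = -1
--     for marca in marcas_estandarizadas:
--         puntos = 0
--         for c in marca:
--             puntos += freq.get(c, 0)
--         if puntos > mejor_puntos:
--             mejor = marca
--             mejor_puntos = puntos
--     return mejor
-- ===== Notes on version B (the rewrite author's own statement) =====
-- stated objective: faster
-- what changed: B builds a frequency table of the input's characters in one pass and scores each brand by summing frequencies of the brand's own letters with a manual first-max argmax, instead of A's re-scanning the whole input once per brand and doing max+index over a score list.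
import Mathlib
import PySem

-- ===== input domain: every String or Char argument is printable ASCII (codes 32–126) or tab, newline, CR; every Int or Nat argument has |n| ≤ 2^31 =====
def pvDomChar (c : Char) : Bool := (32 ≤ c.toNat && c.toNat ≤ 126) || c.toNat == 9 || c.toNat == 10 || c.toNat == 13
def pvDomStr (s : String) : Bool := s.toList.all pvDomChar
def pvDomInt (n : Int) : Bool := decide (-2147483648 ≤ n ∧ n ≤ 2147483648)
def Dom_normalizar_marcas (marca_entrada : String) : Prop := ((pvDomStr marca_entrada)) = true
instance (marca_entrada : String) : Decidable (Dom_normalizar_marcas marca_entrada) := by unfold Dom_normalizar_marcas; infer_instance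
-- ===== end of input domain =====

-- B builds one frequency table of the input and scores each brand over its own letters with a
-- first-max argmax, instead of A's rescanning the input once per brand and doing max+index.

-- ===== PORT A =====
def normalizar_marcas (marca_entrada : String) : String :=
  let marcas_estandarizadas : List String := ["DELL", "HP", "Lenovo"]
  if ¬ marcas_estandarizadas.contains marca_entrada then
    let coincidencias_lista : List Int := marcas_estandarizadas.foldl
      (fun acc marca_estandarizada =>
        acc ++ [marca_entrada.toList.foldl
          (fun coincidencias letra =>
            coincidencias + (PySem.Str.count marca_estandarizada (String.singleton letra) : Int))
          0])
      []
    let posicion : Int :=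
      ((PySem.List.index? coincidencias_lista
        ((PySem.List.max? coincidencias_lista (fun v => v)).getD 0)).getD 0 : Int)
    PySem.List.pyGetD marcas_estandarizadas posicion ""
  else
    marca_entrada

-- ===== PORT B =====
def normalizar_marcas_alt (marca_entrada : String) : String :=
  let marcas_estandarizadas : List String := ["DELL", "HP", "Lenovo"]
  if marcas_estandarizadas.contains marca_entrada then
    marca_entrada
  else
    let freq : PySem.Dict Char Int :=
      marca_entrada.toList.foldl (fun d c => d.insert c (d.getD c 0 + 1)) PySem.Dict.empty
    let r : Option String × Int := marcas_estandarizadas.foldl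
      (fun st marca =>
        let puntos := marca.toList.foldl (fun p c => p + freq.getD c 0) (0 : Int)
        if puntos > st.2 then (some marca, puntos) else st)
      (none, -1)
    (r.1).getD ""

-- ===== PRECONDITION & SPEC =====
def Spec_normalizar_marcas (marca_entrada : String) (out : String) : Prop := out = normalizar_marcas_alt marca_entrada
instance (marca_entrada : String) (out : String) : Decidable (Spec_normalizar_marcas marca_entrada out) := by unfold Spec_normalizar_marcas; infer_instance

-- ===== CLAIM (what is proved, stated in full; the proofs are below) =====
def Claim_equal_normalizar_marcas : Prop := ∀ (marca_entrada : String), Dom_normalizar_marcas marca_entrada → Spec_normalizar_marcas marca_entrada (normalizar_marcas marca_entrada)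

-- ===== LEMMAS AND PROOFS =====

theorem pv_count_go_single (c : Char) :
    ∀ (l : List Char) (fuel acc : Nat), l.length ≤ fuel →
      PySem.Chars.count.go [c] fuel l acc = acc + l.count c := by
  intro l
  induction l with
  | nil => intro fuel acc _; cases fuel <;> simp [PySem.Chars.count.go]
  | cons a t ih =>
    intro fuel acc h
    cases fuel with
    | zero => simp at h
    | succ f =>
      rw [PySem.Chars.count.go]
      have ht : t.length ≤ f := by simpa using h
      by_cases hc : c = a
      · subst hc
        have hp : ([c].isPrefixOf (c :: t)) = true := by simp [List.isPrefixOf]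
        rw [hp]
        simp only [if_true]
        have hd : List.drop ([c].length) (c :: t) = t := by simp
        rw [hd, ih f (acc + 1) ht]
        simp
        omega
      · have hp : ([c].isPrefixOf (a :: t)) = false := by
          simp [List.isPrefixOf, hc]
        rw [hp]
        simp only [Bool.false_eq_true, if_false]
        rw [ih f acc ht]
        have hne : (a == c) = false := by simp; exact fun h' => hc h'.symm
        simp [List.count_cons, hne]

theorem pv_count_single (s : String) (c : Char) :
    PySem.Str.count s (String.singleton c) = s.toList.count c := by
  have := pv_count_go_single c s.toList s.length 0 (by simp)
  simpa [PySem.Str.count, PySem.Chars.count, String.singleton] using this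

theorem pv_map_sum_add (f g : Char → Int) (v : List Char) :
    (v.map (fun b => f b + g b)).sum = (v.map f).sum + (v.map g).sum := by
  induction v with
  | nil => simp
  | cons x w ihv => simp only [List.map_cons, List.sum_cons, ihv]; ring

theorem pv_ite_sum (a : Char) (v : List Char) :
    (v.map (fun b => ((if a == b then 1 else 0 : Nat) : Int))).sum = (v.count a : Int) := by
  induction v with
  | nil => simp
  | cons x w ihv =>
    simp only [List.map_cons, List.sum_cons, ihv, List.count_cons]
    by_cases hx : a = x
    · simp [hx]; ring
    · have h1 : (a == x) = false := by simpa using hx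
      have h2 : (x == a) = false := by simp; exact fun h' => hx h'.symm
      simp [h1, h2]

theorem pv_sum_count_sym (u v : List Char) :
    (u.map (fun a => ((v.count a : Nat) : Int))).sum
      = (v.map (fun b => ((u.count b : Nat) : Int))).sum := by
  induction u with
  | nil => simp
  | cons a t ih =>
    simp only [List.map_cons, List.sum_cons, ih, List.count_cons]
    have : (v.map (fun b => (((t.count b + if a == b then 1 else 0 : Nat)) : Int))).sum
        = (v.map (fun b => ((t.count b : Nat) : Int)
              + ((if a == b then 1 else 0 : Nat) : Int))).sum := by
      simp [Nat.cast_add]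
    rw [this, pv_map_sum_add, pv_ite_sum]; ring

def pvScoreA (s marca : String) : Int :=
  s.toList.foldl
    (fun coincidencias letra =>
      coincidencias + (PySem.Str.count marca (String.singleton letra) : Int)) 0

def pvScoreB (s marca : String) : Int :=
  marca.toList.foldl
    (fun p c =>
      p + (s.toList.foldl (fun d c => d.insert c (d.getD c 0 + 1)) PySem.Dict.empty).getD c 0)
    (0 : Int)

theorem pv_score_eq (s marca : String) : pvScoreA s marca = pvScoreB s marca := by
  unfold pvScoreA pvScoreB
  rw [PySem.List.foldl_add s.toList
        (fun letra => (PySem.Str.count marca (String.singleton letra) : Int)) 0,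
      PySem.List.foldl_add marca.toList
        (fun c => (s.toList.foldl (fun d c => d.insert c (d.getD c 0 + 1))
            PySem.Dict.empty).getD c 0) 0,
      PySem.Dict.foldl_insert_getD_add_one_eq_counter]
  simp only [PySem.Dict.getD_counter, pv_count_single]
  simpa using pv_sum_count_sym s.toList marca.toList

theorem pv_score_nonneg (s marca : String) : 0 ≤ pvScoreA s marca := by
  unfold pvScoreA
  rw [PySem.List.foldl_add s.toList
        (fun letra => (PySem.Str.count marca (String.singleton letra) : Int)) 0]
  have : ∀ l : List Int, (∀ a ∈ l, 0 ≤ a) → 0 ≤ l.sum := by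
    intro l h; induction l with
    | nil => simp
    | cons a t ih => simp only [List.sum_cons]; have := h a (by simp)
                     have := ih (fun b hb => h b (by simp [hb])); omega
  have := this (s.toList.map fun letra => (PySem.Str.count marca (String.singleton letra) : Int))
    (by intro a ha; simp at ha; obtain ⟨c, _, hc⟩ := ha; omega)
  omega

theorem pv_select_eq (x y z : Int) (hx : 0 ≤ x) (_hy : 0 ≤ y) (_hz : 0 ≤ z) :
    PySem.List.pyGetD ["DELL", "HP", "Lenovo"]
        (((PySem.List.index? [x, y, z]
          ((PySem.List.max? [x, y, z] (fun v => v)).getD 0)).getD 0 : Nat) : Int) ""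
      = ((([("DELL" : String), "HP", "Lenovo"].foldl
            (fun (st : Option String × Int) (marca : String) =>
              let puntos := if marca = "DELL" then x else if marca = "HP" then y else z
              if puntos > st.2 then (some marca, puntos) else st)
            (none, -1)).1).getD "") := by
  have hdx : (-1 : Int) < x := by omega
  by_cases hxy : x < y
  · by_cases hyz : y < z
    · -- max = z, index 2, Lenovo both
      have h1 : x ≠ z := by omega
      have h2 : y ≠ z := by omega
      simp [PySem.List.max?, PySem.List.index?, List.idxOf?, List.findIdx?, List.findIdx?.go, beq_iff_eq,
        PySem.List.pyGetD, hxy, hyz, h1, h2, hdx]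
    · -- max = y, index 1, HP both
      have h1 : x ≠ y := by omega
      simp [PySem.List.max?, PySem.List.index?, List.idxOf?, List.findIdx?, List.findIdx?.go, beq_iff_eq,
        PySem.List.pyGetD, hxy, hyz, h1, hdx]
  · by_cases hxz : x < z
    · have hyz : y < z := by omega
      have h1 : x ≠ z := by omega
      have h2 : y ≠ z := by omega
      simp [PySem.List.max?, PySem.List.index?, List.idxOf?, List.findIdx?, List.findIdx?.go, beq_iff_eq,
        PySem.List.pyGetD, hxy, hxz, h1, h2, hdx]
    · simp [PySem.List.max?, PySem.List.index?, List.idxOf?, List.findIdx?, List.findIdx?.go,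
        PySem.List.pyGetD, hxy, hxz, hdx]

-- ===== VERDICT (by name: the statement is the Claim_ definition above) =====
theorem normalizar_marcas_spec : Claim_equal_normalizar_marcas := by
  intro s _
  unfold Spec_normalizar_marcas normalizar_marcas normalizar_marcas_alt
  by_cases h : (["DELL", "HP", "Lenovo"] : List String).contains s
  · have hs : s = "DELL" ∨ s = "HP" ∨ s = "Lenovo" := by simpa using h
    rcases hs with hs | hs | hs <;> subst hs <;> simp
  · simp only [h, not_false_iff, if_true, if_false, Bool.false_eq_true,
      List.foldl]
    rw [show ("DELL" : String).toList.foldl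
          (fun p c => p + (s.toList.foldl (fun d c => d.insert c (d.getD c 0 + 1))
            PySem.Dict.empty).getD c 0) (0 : Int) = pvScoreB s "DELL" from rfl,
        show ("HP" : String).toList.foldl
          (fun p c => p + (s.toList.foldl (fun d c => d.insert c (d.getD c 0 + 1))
            PySem.Dict.empty).getD c 0) (0 : Int) = pvScoreB s "HP" from rfl,
        show ("Lenovo" : String).toList.foldl
          (fun p c => p + (s.toList.foldl (fun d c => d.insert c (d.getD c 0 + 1))
            PySem.Dict.empty).getD c 0) (0 : Int) = pvScoreB s "Lenovo" from rfl,
        ← pv_score_eq s "DELL", ← pv_score_eq s "HP", ← pv_score_eq s "Lenovo"]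
    rw [show (List.foldl (fun coincidencias letra =>
          coincidencias + (PySem.Str.count "DELL" (String.singleton letra) : Int)) 0 s.toList)
          = pvScoreA s "DELL" from rfl,
        show (List.foldl (fun coincidencias letra =>
          coincidencias + (PySem.Str.count "HP" (String.singleton letra) : Int)) 0 s.toList)
          = pvScoreA s "HP" from rfl,
        show (List.foldl (fun coincidencias letra =>
          coincidencias + (PySem.Str.count "Lenovo" (String.singleton letra) : Int)) 0 s.toList)
          = pvScoreA s "Lenovo" from rfl]
    have := pv_select_eq (pvScoreA s "DELL") (pvScoreA s "HP") (pvScoreA s "Lenovo")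
      (pv_score_nonneg s "DELL") (pv_score_nonneg s "HP") (pv_score_nonneg s "Lenovo")
    simpa using this
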